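-- pv_equiv track=rewrite | github.com/Mendi23/HMMmodel | scripts_t/ner_eval.py | normalize_bio
-- ===== SOURCE A (Python) =====
-- def normalize_bio(tagged_sent):
--     last_bio, last_type = "O","O"
--     normalized = []
--     for word, tag in tagged_sent:
--         if tag == "O": tag = "O-O"
--         bio,typ = tag.split("-",1)
--         if bio=="I" and last_bio=="O": bio="B"
--         if bio=="I" and last_type!=typ: bio="B"
--         normalized.append((word,(bio,typ)))
--         last_bio,last_type=bio,typ
--     return normalized
-- ===== SOURCE B (Python) =====
-- def normalize_bio(tagged_sent):
--     # Stage 1: parse every tag into (word, bio, type), rewriting "O" -> "O-O".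
--     parsed = []
--     for w, t in tagged_sent:
--         b, y = ("O-O" if t == "O" else t).split("-", 1)
--         parsed.append((w, b, y))
--     # Stage 2: group tokens into maximal chunks in which each token continues
--     # the previous one (previous bio != "O" and same type).
--     chunks = []
--     for tok in parsed:
--         if chunks and _continues(chunks[-1][-1], tok):
--             chunks[-1].append(tok)
--         else:
--             chunks.append([tok])
--     # Stage 3: emit; only a chunk head's "I" becomes "B", the rest stay as-is.
--     out = []
--     for chunk in chunks:
--         w, b, y = chunk[0]
--         out.append((w, ("B" if b == "I" else b, y)))
--         for w2, b2, y2 in chunk[1:]: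
--             out.append((w2, (b2, y2)))
--     return out
--
-- def _continues(prev, cur):
--     return prev[1] != "O" and prev[2] == cur[2]
-- ===== Notes on version B (the rewrite author's own statement) =====
-- stated objective: alternative
-- what changed: B works in three staged passes - parse every tag, group tokens into maximal same-entity chunks (previous bio not 'O' and same type), then emit the chunks turning 'I' into 'B' only at chunk heads - instead of threading last_bio/last_type through a single stateful loop.
-- outside the precondition, e.g. on normalize_bio([('w', 'I')]): A raises ValueError, B raises ValueError
import Mathlib
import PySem

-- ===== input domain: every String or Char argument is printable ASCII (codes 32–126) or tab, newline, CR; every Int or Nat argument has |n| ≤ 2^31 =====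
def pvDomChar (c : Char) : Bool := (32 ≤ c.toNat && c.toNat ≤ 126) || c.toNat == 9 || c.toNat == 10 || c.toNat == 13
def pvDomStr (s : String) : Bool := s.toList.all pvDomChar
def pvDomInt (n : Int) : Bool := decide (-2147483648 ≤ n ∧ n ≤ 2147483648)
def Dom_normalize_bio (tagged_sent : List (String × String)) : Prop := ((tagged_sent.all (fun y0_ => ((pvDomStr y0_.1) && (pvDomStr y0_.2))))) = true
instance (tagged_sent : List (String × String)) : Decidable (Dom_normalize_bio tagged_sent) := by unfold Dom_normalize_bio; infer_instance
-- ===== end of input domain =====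

-- B replaces A's single stateful loop by three staged passes (parse all tags, group tokens
-- into maximal same-entity chunks, emit fixing I->B only at chunk heads); objective: alternative.

-- shared primitive: tag.split("-",1) unpacked into two parts; Python raises ValueError when the
-- tag has no "-" (one part) — Pre_ excludes that, the port returns ("","") there.
def pvSplitPair (tag : String) : String × String :=
  match PySem.Str.splitMax? tag "-" 1 with
  | some (b :: t :: _) => (b, t)
  | _ => ("", "")

-- ===== PORT A =====
def normalize_bio_loop (last_bio last_type : String) (rest : List (String × String)) :
    List (String × (String × String)) :=
  match rest with
  | [] => []
  | (word, tag) :: rest =>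
    let tag := if tag == "O" then "O-O" else tag
    let p := pvSplitPair tag
    let bio := p.1
    let typ := p.2
    let bio := if bio == "I" && last_bio == "O" then "B" else bio
    let bio := if bio == "I" && last_type != typ then "B" else bio
    (word, (bio, typ)) :: normalize_bio_loop bio typ rest

def normalize_bio (tagged_sent : List (String × String)) : List (String × (String × String)) :=
  normalize_bio_loop "O" "O" tagged_sent

-- ===== PORT B =====
-- stage 1: parse every tag into (word, bio, type), rewriting "O" -> "O-O"
def nbParse (ts : List (String × String)) : List (String × String × String) :=
  ts.map (fun wt =>
    let p := pvSplitPair (if wt.2 == "O" then "O-O" else wt.2)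
    (wt.1, p.1, p.2))

def nbContinues (prev cur : String × String × String) : Bool :=
  prev.2.1 != "O" && prev.2.2 == cur.2.2

-- stage 2: Python appends at the ends of `chunks` / `chunks[-1]`; the fold keeps the chunk
-- list and the current chunk reversed (cons = Python append) and restores the order at the end
def nbChunksLoop (acc : List (List (String × String × String)))
    (toks : List (String × String × String)) : List (List (String × String × String)) :=
  match toks with
  | [] => acc
  | tok :: rest =>
    match acc with
    | (last :: c) :: cs =>
      if nbContinues last tok then nbChunksLoop ((tok :: last :: c) :: cs) rest
      else nbChunksLoop ([tok] :: (last :: c) :: cs) rest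
    | _ => nbChunksLoop ([tok] :: acc) rest

def nbChunks (toks : List (String × String × String)) :
    List (List (String × String × String)) :=
  ((nbChunksLoop [] toks).map List.reverse).reverse

-- stage 3: per chunk, the head's "I" becomes "B", the tail is copied as-is
-- (the [] case is unreachable: nbChunksLoop only builds nonempty chunks)
def nbEmitChunk (c : List (String × String × String)) : List (String × (String × String)) :=
  match c with
  | [] => []
  | (w, b, y) :: t => (w, (if b == "I" then "B" else b, y)) :: t.map (fun x => (x.1, (x.2.1, x.2.2)))

def normalize_bio_alt (tagged_sent : List (String × String)) : List (String × (String × String)) :=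
  ((nbChunks (nbParse tagged_sent)).flatMap nbEmitChunk)

-- ===== PRECONDITION & SPEC =====
-- Pre_ excludes inputs where some tag other than "O" contains no "-": there A raises ValueError
-- (unpacking a 1-element split) and B raises too.
def Pre_normalize_bio (tagged_sent : List (String × String)) : Prop :=
  (tagged_sent.all (fun p => p.2 == "O" || p.2.toList.contains '-')) = true
instance (tagged_sent : List (String × String)) : Decidable (Pre_normalize_bio tagged_sent) := by
  unfold Pre_normalize_bio; infer_instance

def pvWitness_normalize_bio : (List (String × String)) :=
  [("Alice", "I-PER"), ("Bob", "O"), ("Rome", "I-LOC")]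

def Spec_normalize_bio (tagged_sent : List (String × String)) (out : List (String × (String × String))) : Prop := out = normalize_bio_alt tagged_sent
instance (tagged_sent : List (String × String)) (out : List (String × (String × String))) : Decidable (Spec_normalize_bio tagged_sent out) := by unfold Spec_normalize_bio; infer_instance

-- ===== CLAIM (what is proved, stated in full; the proofs are below) =====
def Claim_equal_normalize_bio : Prop := ∀ (tagged_sent : List (String × String)), Dom_normalize_bio tagged_sent → Pre_normalize_bio tagged_sent → Spec_normalize_bio tagged_sent (normalize_bio tagged_sent)

-- ===== LEMMAS AND PROOFS =====

-- the common stateless characterisation: each output computed from (prev bio, prev type)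
def specGo (pb pt : String) : List (String × String × String) → List (String × (String × String))
  | [] => []
  | (w, b, y) :: rest =>
    (w, (if b == "I" && (pb == "O" || pt != y) then "B" else b, y)) :: specGo b y rest

lemma loop_eq_specGo (rest : List (String × String)) (lb lt pb pt : String)
    (hb : (lb == "O") = (pb == "O")) (ht : lt = pt) :
    normalize_bio_loop lb lt rest = specGo pb pt (nbParse rest) := by
  induction rest generalizing lb lt pb pt with
  | nil => simp [normalize_bio_loop, nbParse, specGo]
  | cons hd rest ih =>
    obtain ⟨w, tg⟩ := hd
    simp only [normalize_bio_loop, nbParse, List.map_cons, specGo]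
    set p := pvSplitPair (if tg == "O" then "O-O" else tg) with hp
    have hbio :
        (if (if p.1 == "I" && lb == "O" then "B" else p.1) == "I" && lt != p.2 then "B"
         else if p.1 == "I" && lb == "O" then "B" else p.1)
        = (if p.1 == "I" && (pb == "O" || pt != p.2) then "B" else p.1) := by
      by_cases h1 : p.1 = "I" <;> by_cases h2 : lb = "O" <;> by_cases h3 : lt = p.2 <;>
        simp_all
    rw [hbio]
    refine congrArg _ ?_
    apply ih
    · by_cases h1 : p.1 = "I"
      · rw [h1]; split_ifs <;> simp
      · simp [h1]
    · rfl

def nbPlain (x : String × String × String) : String × (String × String) :=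
  (x.1, (x.2.1, x.2.2))

def nbFix (x : String × String × String) : String × (String × String) :=
  (x.1, (if x.2.1 == "I" then "B" else x.2.1, x.2.2))

lemma emitChunk_cons (h : String × String × String) (t : List (String × String × String)) :
    nbEmitChunk (h :: t) = nbFix h :: t.map nbPlain := by
  obtain ⟨w, b, y⟩ := h; rfl

lemma specGo_cons (pb pt : String) (x : String × String × String)
    (rest : List (String × String × String)) :
    specGo pb pt (x :: rest)
      = (x.1, (if x.2.1 == "I" && (pb == "O" || pt != x.2.2) then "B" else x.2.1, x.2.2))
        :: specGo x.2.1 x.2.2 rest := by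
  obtain ⟨w, b, y⟩ := x; rfl

-- the final-shape of the accumulator
def nbFinal (acc : List (List (String × String × String))) :
    List (String × (String × String)) :=
  ((acc.map List.reverse).reverse).flatMap nbEmitChunk

lemma nbFinal_grow (last : String × String × String) (c : List (String × String × String))
    (cs : List (List (String × String × String))) (tok : String × String × String) :
    nbFinal ((tok :: last :: c) :: cs) = nbFinal ((last :: c) :: cs) ++ [nbPlain tok] := by
  simp only [nbFinal, List.map_cons, List.reverse_cons, List.flatMap_append,
    List.flatMap_cons, List.flatMap_nil, List.reverse_cons]
  obtain ⟨h, t, heq⟩ := List.exists_cons_of_ne_nil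
    (show c.reverse ++ [last] ≠ [] by simp)
  rw [heq]
  simp [emitChunk_cons, nbPlain]

lemma nbFinal_new (acc : List (List (String × String × String)))
    (tok : String × String × String) :
    nbFinal ([tok] :: acc) = nbFinal acc ++ [nbFix tok] := by
  simp [nbFinal, emitChunk_cons]

lemma chunksLoop_spec (toks : List (String × String × String))
    (last : String × String × String) (c : List (String × String × String))
    (cs : List (List (String × String × String))) :
    nbFinal (nbChunksLoop ((last :: c) :: cs) toks)
      = nbFinal ((last :: c) :: cs) ++ specGo last.2.1 last.2.2 toks := by
  induction toks generalizing last c cs with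
  | nil => simp [nbChunksLoop, specGo]
  | cons tok rest ih =>
    rw [specGo_cons]
    simp only [nbChunksLoop]
    by_cases hc : nbContinues last tok
    · rw [if_pos hc, ih, nbFinal_grow]
      have hcond : (tok.2.1 == "I" && (last.2.1 == "O" || last.2.2 != tok.2.2)) = false := by
        simp only [nbContinues, Bool.and_eq_true, bne_iff_ne, beq_iff_eq] at hc
        simp [hc.1, hc.2]
      simp [hcond, nbPlain]
    · rw [if_neg hc, ih, nbFinal_new]
      have hcond : tok.2.1 == "I" → (last.2.1 == "O" || last.2.2 != tok.2.2) = true := by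
        intro _
        simp only [nbContinues, Bool.and_eq_true, not_and_or, bne_iff_ne, beq_iff_eq] at hc
        rcases hc with h | h
        · simp at h; simp [h]
        · simp [h]
      have hfix : nbFix tok
          = (tok.1, (if tok.2.1 == "I" && (last.2.1 == "O" || last.2.2 != tok.2.2)
                     then "B" else tok.2.1, tok.2.2)) := by
        simp only [nbFix]
        by_cases h : tok.2.1 == "I"
        · simp [h, hcond h]
        · simp [h]
      rw [List.append_assoc]
      congr 1
      rw [← hfix]
      simp

lemma alt_eq_specGo (ts : List (String × String)) :
    normalize_bio_alt ts = specGo "O" "O" (nbParse ts) := by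
  have : normalize_bio_alt ts = nbFinal (nbChunksLoop [] (nbParse ts)) := rfl
  rw [this]
  rcases h : nbParse ts with _ | ⟨x, rest⟩
  · simp [nbChunksLoop, nbFinal, specGo]
  · simp only [nbChunksLoop]
    rw [chunksLoop_spec, nbFinal_new, specGo_cons]
    simp [nbFinal, nbFix]

-- ===== VERDICT (by name: the statement is the Claim_ definition above) =====
theorem normalize_bio_spec : Claim_equal_normalize_bio := by
  intro ts _ _
  show normalize_bio ts = normalize_bio_alt ts
  rw [alt_eq_specGo, normalize_bio]
  exact loop_eq_specGo ts "O" "O" "O" "O" rfl rfl
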